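-- pv_equiv track=rewrite | github.com/KEUMIN/algorithm_2024 | dp/hopscotch_1.py | solution
-- ===== SOURCE A (Python) =====
-- def solution(land):
--     ln = len(land)
--     sum = [[0] * 4 for _ in range(ln)]
--     sum[0] = land[0]
--     for i in range(1, ln):
--         for j in range(4):
--             sum[i][j] = max(sum[i - 1][:j] + sum[i - 1][j + 1 :]) + land[i][j]
--
--     return max(sum[ln - 1])
-- ===== SOURCE B (Python) =====
-- def _best_two(prev):
--     # one pass: largest value, index of its first occurrence, second-largest value
--     m1 = None
--     idx = -1
--     m2 = None
--     for k, v in enumerate(prev):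
--         if m1 is None or v > m1:
--             m2, m1, idx = m1, v, k
--         elif m2 is None or v > m2:
--             m2 = v
--     return m1, idx, m2
--
--
-- def solution(land):
--     prev = land[0]
--     for row in land[1:]:
--         m1, idx, m2 = _best_two(prev)
--         prev = [row[j] + (m2 if j == idx else m1) for j in range(4)]
--     return max(prev)
-- ===== Notes on version B (the rewrite author's own statement) =====
-- stated objective: alternative
-- what changed: Instead of re-slicing the previous DP row and taking max over the remainder for each of the 4 columns, B computes the previous row's max, its first argmax index and the second max in one pass, then fills each column with one addition; only the previous row is kept instead of the full table.
import Mathlib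
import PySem

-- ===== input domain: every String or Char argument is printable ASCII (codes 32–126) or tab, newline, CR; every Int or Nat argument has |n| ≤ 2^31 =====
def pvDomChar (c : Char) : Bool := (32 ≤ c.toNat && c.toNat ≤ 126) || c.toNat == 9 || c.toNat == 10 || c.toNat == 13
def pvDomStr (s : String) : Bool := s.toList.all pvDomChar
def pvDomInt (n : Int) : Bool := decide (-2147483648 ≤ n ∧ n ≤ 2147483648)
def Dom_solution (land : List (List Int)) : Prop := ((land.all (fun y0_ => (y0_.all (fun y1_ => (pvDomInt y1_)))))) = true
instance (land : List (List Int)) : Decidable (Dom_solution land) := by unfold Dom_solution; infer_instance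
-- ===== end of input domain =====

-- B replaces A's per-column slice-and-max over the previous DP row by one pass computing the
-- previous row's max, first argmax index and second max, keeping only the previous row (alternative).


-- ===== PORT A =====
-- inner-loop body: sum[i][j] = max(sum[i-1][:j] + sum[i-1][j+1:]) + land[i][j]
def bodyA (land : List (List Int)) (i : Int) (s : List (List Int)) (j : Int) : List (List Int) :=
  let prev := (PySem.List.pyGet? s (i - 1)).getD []
  let row := (PySem.List.pyGet? s i).getD []
  let v := (PySem.List.max? (PySem.List.slice prev none (some j) ++ PySem.List.slice prev (some (j + 1)) none) (fun y => y)).getD 0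
           + (PySem.List.pyGet? ((PySem.List.pyGet? land i).getD []) j).getD 0
  PySem.List.pySetD s i (PySem.List.pySetD row j v)

-- outer-loop body: for j in range(4): …
def outerA (land : List (List Int)) (s : List (List Int)) (i : Int) : List (List Int) :=
  (PySem.List.pyRange 0 4 1).foldl (bodyA land i) s

def solution (land : List (List Int)) : Int :=
  let ln : Int := land.length
  let sum0 : List (List Int) := (PySem.List.pyRange 0 ln 1).map (fun _ => PySem.List.pyRepeat [0] 4)
  let sum1 : List (List Int) := PySem.List.pySetD sum0 0 ((PySem.List.pyGet? land 0).getD [])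
  let sumF : List (List Int) := (PySem.List.pyRange 1 ln 1).foldl (outerA land) sum1
  (PySem.List.max? ((PySem.List.pyGet? sumF (ln - 1)).getD []) (fun y => y)).getD 0

-- ===== PORT B =====
-- one step of the one-pass scan in _best_two
def btStep (st : Option Int × Int × Option Int) (kv : Int × Int) : Option Int × Int × Option Int :=
  match st with
  | (m1, idx, m2) =>
    match m1 with
    | none => (some kv.2, kv.1, none)
    | some a =>
      if a < kv.2 then (some kv.2, kv.1, some a)
      else
        match m2 with
        | none => (some a, idx, some kv.2)
        | some b => if b < kv.2 then (some a, idx, some kv.2) else (some a, idx, some b)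

-- _best_two(prev): (largest, index of its first occurrence, second largest)
def bestTwo (prev : List Int) : Option Int × Int × Option Int :=
  (PySem.List.enumerate prev 0).foldl btStep (none, -1, none)

-- prev = [row[j] + (m2 if j == idx else m1) for j in range(4)]
def stepRowB (prev row : List Int) : List Int :=
  let t := bestTwo prev
  (PySem.List.pyRange 0 4 1).map (fun j =>
    (PySem.List.pyGet? row j).getD 0 + (if j = t.2.1 then t.2.2 else t.1).getD 0)

def solution_alt (land : List (List Int)) : Int :=
  let prev0 := (PySem.List.pyGet? land 0).getD []
  let prevF := (PySem.List.slice land (some 1) none).foldl (fun prev row => stepRowB prev row) prev0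
  (PySem.List.max? prevF (fun y => y)).getD 0

-- ===== PRECONDITION & SPEC =====
-- Exactly where the Python A returns: land nonempty (else IndexError on land[0]), the first row
-- nonempty (else max of an empty list), with at least 2 entries when there is more than one row
-- (else max([]) in the first DP step), and every later row with at least 4 entries (else land[i][j]).
def Pre_solution (land : List (List Int)) : Prop :=
  land ≠ [] ∧ 1 ≤ (land.headD []).length ∧ (1 < land.length → 2 ≤ (land.headD []).length) ∧
    ∀ r ∈ land.tail, 4 ≤ r.length
instance (land : List (List Int)) : Decidable (Pre_solution land) := by unfold Pre_solution; infer_instance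
def pvWitness_solution : List (List Int) := [[1, 2, 3, 4], [5, 6, 7, 8], [4, 3, 2, 1]]
def Spec_solution (land : List (List Int)) (out : Int) : Prop := out = solution_alt land
instance (land : List (List Int)) (out : Int) : Decidable (Spec_solution land out) := by unfold Spec_solution; infer_instance

-- ===== CLAIM (what is proved, stated in full; the proofs are below) =====
def Claim_equal_solution : Prop := ∀ (land : List (List Int)), Dom_solution land → Pre_solution land → Spec_solution land (solution land)

-- ===== LEMMAS AND PROOFS =====

-- value of Python's max(l): any upper bound that is a member
theorem maxval (l : List Int) (m : Int) (hm : m ∈ l) (hmax : ∀ y ∈ l, y ≤ m) :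
    PySem.List.max? l (fun y => y) = some m := by
  cases h : PySem.List.max? l (fun y => y) with
  | none => exact absurd ((PySem.List.max?_eq_none_iff l (fun y => y)).mp h) (List.ne_nil_of_mem hm)
  | some m' =>
    have h1 := PySem.List.max?_isMax h m hm
    have h2 := hmax m' (PySem.List.max?_mem h)
    simp only [Option.some.injEq]; omega

-- invariant of the _best_two scan after consuming `seen`
def BTInv (seen : List Int) (st : Option Int × Int × Option Int) : Prop :=
  (seen = [] ∧ st = (none, -1, none)) ∨
  (∃ (i : Nat) (hi : i < seen.length),
     st = (some seen[i], (i : Int), PySem.List.max? (seen.eraseIdx i) (fun y => y)) ∧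
     ∀ (j : Nat) (hj : j < seen.length), seen[j] ≤ seen[i])

theorem btStep_inv (seen : List Int) (v : Int) (st : Option Int × Int × Option Int)
    (h : BTInv seen st) : BTInv (seen ++ [v]) (btStep st ((seen.length : Int), v)) := by
  rcases h with ⟨hnil, hst⟩ | ⟨i, hi, hst, hmax⟩
  · subst hnil; subst hst
    refine Or.inr ⟨0, by simp, ?_, ?_⟩
    · simp [btStep]
      rfl
    · intro j hj
      simp at hj
      subst hj
      simp
  · subst hst
    have hmem : ∀ y ∈ seen, y ≤ seen[i] := fun y hy => by
      obtain ⟨j, hj, rfl⟩ := List.mem_iff_getElem.mp hy; exact hmax j hj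
    by_cases hlt : seen[i] < v
    · refine Or.inr ⟨seen.length, by simp, ?_, ?_⟩
      · have he : (seen ++ [v]).eraseIdx seen.length = seen := by
          rw [List.eraseIdx_append_of_length_le (by omega)]; simp
        have hm : PySem.List.max? seen (fun y => y) = some seen[i] :=
          maxval _ _ (List.getElem_mem hi) hmem
        simp [btStep, hlt, he, hm]
      · intro j hj
        simp only [List.length_append, List.length_cons, List.length_nil] at hj
        by_cases hjl : j < seen.length
        · rw [List.getElem_append_left hjl, List.getElem_concat_length rfl]
          have := hmax j hjl; omega
        · have hje : j = seen.length := by omega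
          subst hje
          exact le_refl _
    · refine Or.inr ⟨i, by simp; omega, ?_, ?_⟩
      · have he : (seen ++ [v]).eraseIdx i = seen.eraseIdx i ++ [v] :=
          List.eraseIdx_append_of_lt_length hi [v]
        rw [he, List.getElem_append_left hi]
        cases hm2 : PySem.List.max? (seen.eraseIdx i) (fun y => y) with
        | none =>
          have he0 : seen.eraseIdx i = [] := (PySem.List.max?_eq_none_iff _ _).mp hm2
          rw [he0]
          simp [btStep, hlt]
          rfl
        | some b =>
          have hbm := PySem.List.max?_mem hm2
          have hbmax := PySem.List.max?_isMax hm2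
          by_cases hbv : b < v
          · have : PySem.List.max? (seen.eraseIdx i ++ [v]) (fun y => y) = some v := by
              refine maxval _ _ (by simp) ?_
              intro y hy
              rcases List.mem_append.mp hy with hy | hy
              · have := hbmax y hy; simp at this ⊢; omega
              · simp at hy; omega
            simp [btStep, hlt, hbv, this]
          · have : PySem.List.max? (seen.eraseIdx i ++ [v]) (fun y => y) = some b := by
              refine maxval _ _ (by simp [hbm]) ?_
              intro y hy
              rcases List.mem_append.mp hy with hy | hy
              · have := hbmax y hy; simpa using this
              · simp at hy; omega
            simp [btStep, hlt, hbv, this]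
      · intro j hj
        simp only [List.length_append, List.length_cons, List.length_nil] at hj
        rw [List.getElem_append_left hi]
        by_cases hjl : j < seen.length
        · rw [List.getElem_append_left hjl]; exact hmax j hjl
        · have : j = seen.length := by omega
          subst this
          rw [List.getElem_concat_length rfl]; omega

theorem foldl_inv (t seen : List Int) (st : Option Int × Int × Option Int) (h : BTInv seen st) :
    BTInv (seen ++ t) ((PySem.List.enumerate t (seen.length : Int)).foldl btStep st) := by
  induction t generalizing seen st with
  | nil => simpa using h
  | cons x t ih =>
    rw [PySem.List.enumerate_cons, List.foldl_cons]
    have h1 := btStep_inv seen x st h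
    have h2 := ih (seen ++ [x]) _ h1
    simpa using h2

theorem bestTwo_inv (l : List Int) : BTInv l (bestTwo l) := by
  have h := foldl_inv l [] (none, -1, none) (Or.inl ⟨rfl, rfl⟩)
  simpa [bestTwo] using h

-- max over the previous row with one column removed, when the removed column is not the argmax
theorem maxslice_ne (l : List Int) (i n : Nat) (hi : i < l.length)
    (hmax : ∀ (j : Nat) (hj : j < l.length), l[j] ≤ l[i]) (hne : n ≠ i) :
    PySem.List.max? (l.take n ++ l.drop (n + 1)) (fun y => y) = some l[i] := by
  refine maxval _ _ ?_ ?_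
  · rcases Nat.lt_or_ge i n with h | h
    · refine List.mem_append.mpr (Or.inl (List.mem_iff_getElem.mpr ⟨i, by simp; omega, ?_⟩))
      rw [List.getElem_take]
    · have hgt : n < i := by omega
      refine List.mem_append.mpr (Or.inr (List.mem_iff_getElem.mpr ⟨i - (n + 1), by simp; omega, ?_⟩))
      rw [List.getElem_drop]
      congr 1
      omega
  · intro y hy
    have hyl : y ∈ l := by
      rcases List.mem_append.mp hy with hy | hy
      · exact List.take_subset _ _ hy
      · exact List.drop_subset _ _ hy
    obtain ⟨j, hj, rfl⟩ := List.mem_iff_getElem.mp hyl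
    exact hmax j hj

-- the row A's inner loop computes, as a function of the previous row and land[i]
def aRow (prev lrow : List Int) : List Int :=
  (PySem.List.pyRange 0 4 1).map (fun j =>
    (PySem.List.max? (PySem.List.slice prev none (some j) ++ PySem.List.slice prev (some (j + 1)) none) (fun y => y)).getD 0
    + (PySem.List.pyGet? lrow j).getD 0)

theorem stepEq (prev lrow : List Int) (h2 : 2 ≤ prev.length) :
    aRow prev lrow = stepRowB prev lrow := by
  have hne : prev ≠ [] := by intro h; subst h; simp at h2
  rcases bestTwo_inv prev with ⟨h0, _⟩ | ⟨i, hi, hst, hmax⟩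
  · exact absurd h0 hne
  simp only [aRow, stepRowB, hst]
  refine List.map_congr_left ?_
  intro j hj
  have hj' := PySem.List.mem_pyRange_one.mp hj
  obtain ⟨n, rfl⟩ : ∃ n : Nat, j = (n : Int) := ⟨j.toNat, by omega⟩
  have e1 : PySem.List.slice prev none (some ((n : Nat) : Int)) = prev.take n :=
    PySem.List.slice_to_natCast prev n
  have e2 : PySem.List.slice prev (some (((n : Nat) : Int) + 1)) none = prev.drop (n + 1) := by
    have h : ((n : Nat) : Int) + 1 = (((n + 1 : Nat)) : Int) := by push_cast; ring
    rw [h, PySem.List.slice_from_natCast]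
  rw [e1, e2]
  by_cases hni : n = i
  · subst hni
    rw [← List.eraseIdx_eq_take_drop_succ]
    simp only [if_pos trivial]
    ring
  · have hni' : ((n : Nat) : Int) ≠ ((i : Nat) : Int) := by exact_mod_cast hni
    rw [if_neg hni', maxslice_ne prev i n hi hmax hni]
    simp only [Option.getD_some]
    ring

theorem length_aRow (prev lrow : List Int) : (aRow prev lrow).length = 4 := by
  simp [aRow, PySem.List.length_pyRange_one]

-- A's inner loop over j = 0..3 just replaces row i of the table with aRow
-- the value written by A's inner loop at column j
def vA (prev L : List Int) (j : Int) : Int :=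
  (PySem.List.max? (PySem.List.slice prev none (some j) ++ PySem.List.slice prev (some (j + 1)) none) (fun y => y)).getD 0
  + (PySem.List.pyGet? L j).getD 0

theorem bodyA_unfold (land s : List (List Int)) (n : Nat) (j : Int) :
    bodyA land ((n : Nat) : Int) s j =
      s.set n (PySem.List.pySetD ((PySem.List.pyGet? s ((n : Nat) : Int)).getD []) j
        (vA ((PySem.List.pyGet? s (((n : Nat) : Int) - 1)).getD [])
            ((PySem.List.pyGet? land ((n : Nat) : Int)).getD []) j)) := by
  simp only [bodyA, vA, PySem.List.pySetD_natCast]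

theorem pyGet?_set_pred (s : List (List Int)) (n : Nat) (h1 : 1 ≤ n) (hn : n < s.length)
    (r : List Int) :
    PySem.List.pyGet? (s.set n r) (((n : Nat) : Int) - 1) = PySem.List.pyGet? s (((n : Nat) : Int) - 1) := by
  have h : ((n : Nat) : Int) - 1 = (((n - 1 : Nat)) : Int) := by omega
  have hlen : n - 1 < s.length := by omega
  rw [h, PySem.List.pyGet?_natCast, PySem.List.pyGet?_natCast]
  exact List.getElem?_set_ne (by omega)

theorem pyGet?_set_self (s : List (List Int)) (n : Nat) (hn : n < s.length) (r : List Int) :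
    (PySem.List.pyGet? (s.set n r) ((n : Nat) : Int)).getD [] = r := by
  rw [PySem.List.pyGet?_natCast, List.getElem?_set_self (by simpa using hn)]
  rfl

theorem inner_eq (land s : List (List Int)) (n : Nat) (h1 : 1 ≤ n) (hn : n < s.length)
    (hrow : s[n] = PySem.List.pyRepeat [0] 4) :
    outerA land s ((n : Nat) : Int) =
      s.set n (aRow ((PySem.List.pyGet? s ((n : Int) - 1)).getD [])
                    ((PySem.List.pyGet? land (n : Int)).getD [])) := by
  have hsn : (PySem.List.pyGet? s ((n : Nat) : Int)).getD [] = s[n] := by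
    rw [PySem.List.pyGet?_natCast, List.getElem?_eq_getElem hn]; rfl
  have hset0 : ∀ v : Int, PySem.List.pySetD ([0, 0, 0, 0] : List Int) 0 v = [v, 0, 0, 0] :=
    fun v => by rw [PySem.List.pySetD_of_nonneg _ _ (by omega)]; rfl
  have hset1 : ∀ a v : Int, PySem.List.pySetD ([a, 0, 0, 0] : List Int) 1 v = [a, v, 0, 0] :=
    fun a v => by rw [PySem.List.pySetD_of_nonneg _ _ (by omega)]; rfl
  have hset2 : ∀ a b v : Int, PySem.List.pySetD ([a, b, 0, 0] : List Int) 2 v = [a, b, v, 0] :=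
    fun a b v => by rw [PySem.List.pySetD_of_nonneg _ _ (by omega)]; rfl
  have hset3 : ∀ a b c v : Int, PySem.List.pySetD ([a, b, c, 0] : List Int) 3 v = [a, b, c, v] :=
    fun a b c v => by rw [PySem.List.pySetD_of_nonneg _ _ (by omega)]; rfl
  have hrep : s[n] = ([0, 0, 0, 0] : List Int) := by rw [hrow]; rfl
  have hr : PySem.List.pyRange 0 4 1 = ([0, 1, 2, 3] : List Int) := rfl
  set P : List Int := (PySem.List.pyGet? s (((n : Nat) : Int) - 1)).getD [] with hP
  set L : List Int := (PySem.List.pyGet? land ((n : Nat) : Int)).getD [] with hL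
  have e1 : bodyA land ((n : Nat) : Int) s 0 = s.set n [vA P L 0, 0, 0, 0] := by
    rw [bodyA_unfold, hsn, hrep, hset0]
  have e2 : bodyA land ((n : Nat) : Int) (s.set n [vA P L 0, 0, 0, 0]) 1 =
      s.set n [vA P L 0, vA P L 1, 0, 0] := by
    rw [bodyA_unfold, pyGet?_set_self s n hn, pyGet?_set_pred s n h1 hn, hset1, List.set_set]
  have e3 : bodyA land ((n : Nat) : Int) (s.set n [vA P L 0, vA P L 1, 0, 0]) 2 =
      s.set n [vA P L 0, vA P L 1, vA P L 2, 0] := by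
    rw [bodyA_unfold, pyGet?_set_self s n hn, pyGet?_set_pred s n h1 hn, hset2, List.set_set]
  have e4 : bodyA land ((n : Nat) : Int) (s.set n [vA P L 0, vA P L 1, vA P L 2, 0]) 3 =
      s.set n [vA P L 0, vA P L 1, vA P L 2, vA P L 3] := by
    rw [bodyA_unfold, pyGet?_set_self s n hn, pyGet?_set_pred s n h1 hn, hset3, List.set_set]
  show (PySem.List.pyRange 0 4 1).foldl (bodyA land ((n : Nat) : Int)) s = _
  rw [hr]
  simp only [List.foldl_cons, List.foldl_nil]
  rw [e1, e2, e3, e4]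
  rfl

-- the DP rows A computes
def dpA (r0 : List Int) (rest : List (List Int)) : Nat → List Int
  | 0 => r0
  | m + 1 => aRow (dpA r0 rest m) (rest.getD m [])

theorem outer_inv (r0 : List Int) (rest : List (List Int)) (k : Nat) (hk : k ≤ rest.length) :
    ((PySem.List.pyRange 1 (1 + (k : Int)) 1).foldl (outerA (r0 :: rest))
        (PySem.List.pySetD ((PySem.List.pyRange 0 ((r0 :: rest).length : Int) 1).map
            (fun _ => PySem.List.pyRepeat [0] 4)) 0
          ((PySem.List.pyGet? (r0 :: rest) 0).getD []))).length = rest.length + 1 ∧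
    ∀ (m : Nat), m < rest.length + 1 →
      ((PySem.List.pyRange 1 (1 + (k : Int)) 1).foldl (outerA (r0 :: rest))
        (PySem.List.pySetD ((PySem.List.pyRange 0 ((r0 :: rest).length : Int) 1).map
            (fun _ => PySem.List.pyRepeat [0] 4)) 0
          ((PySem.List.pyGet? (r0 :: rest) 0).getD [])))[m]? =
        some (if m ≤ k then dpA r0 rest m else PySem.List.pyRepeat [0] 4) := by
  induction k with
  | zero =>
    rw [show (1 + ((0 : Nat) : Int)) = 1 by norm_num, PySem.List.pyRange_one_eq_nil le_rfl]
    simp only [List.foldl_nil]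
    have hg0 : PySem.List.pyGet? (r0 :: rest) (0 : Int) = some r0 := by
      rw [show (0 : Int) = ((0 : Nat) : Int) from rfl, PySem.List.pyGet?_natCast]
      rfl
    have hlen : (PySem.List.pySetD ((PySem.List.pyRange 0 ((r0 :: rest).length : Int) 1).map
        (fun _ => PySem.List.pyRepeat [0] 4)) 0 ((PySem.List.pyGet? (r0 :: rest) 0).getD [])).length
        = rest.length + 1 := by
      rw [PySem.List.length_pySetD, List.length_map, PySem.List.length_pyRange_one]
      simp
    refine ⟨hlen, ?_⟩
    intro m hm
    simp only [hg0, Option.getD_some]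
    rw [PySem.List.pySetD_of_nonneg _ _ (by omega), Int.toNat_zero]
    have hmaplen : ((PySem.List.pyRange 0 ((r0 :: rest).length : Int) 1).map
        (fun _ => PySem.List.pyRepeat ([0] : List Int) 4)).length = rest.length + 1 := by
      rw [List.length_map, PySem.List.length_pyRange_one]; simp
    rcases Nat.eq_zero_or_pos m with rfl | hmpos
    · rw [List.getElem?_set_self (by omega)]
      simp [dpA]
    · rw [List.getElem?_set_ne (by omega), List.getElem?_map,
        List.getElem?_eq_getElem (by rw [PySem.List.length_pyRange_one]; simp; omega)]
      rw [if_neg (by omega)]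
      rfl
  | succ k ih =>
    have hk' : k ≤ rest.length := by omega
    obtain ⟨ihlen, ihget⟩ := ih hk'
    have hcast : (1 + ((k + 1 : Nat) : Int)) = (1 + (k : Int)) + 1 := by push_cast; ring
    rw [hcast, PySem.List.pyRange_one_succ_right (by omega), List.foldl_append,
      List.foldl_cons, List.foldl_nil]
    set T := (PySem.List.pyRange 1 (1 + (k : Int)) 1).foldl (outerA (r0 :: rest))
        (PySem.List.pySetD ((PySem.List.pyRange 0 ((r0 :: rest).length : Int) 1).map
            (fun _ => PySem.List.pyRepeat [0] 4)) 0
          ((PySem.List.pyGet? (r0 :: rest) 0).getD [])) with hT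
    have hcast2 : (1 + (k : Int)) = (((k + 1 : Nat) : Nat) : Int) := by push_cast; ring
    have hn : k + 1 < T.length := by omega
    have hrowq : T[k + 1]? = some (PySem.List.pyRepeat [0] 4) := by
      rw [ihget (k + 1) (by omega)]
      rw [if_neg (by omega)]
    have hrow : T[k + 1]'hn = PySem.List.pyRepeat [0] 4 := by
      have := List.getElem?_eq_getElem hn
      rw [this] at hrowq
      exact Option.some.inj hrowq
    rw [hcast2, inner_eq (r0 :: rest) T (k + 1) (by omega) hn hrow]
    have hPidx : (((k + 1 : Nat) : Int) - 1) = ((k : Nat) : Int) := by push_cast; ring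
    have hP : (PySem.List.pyGet? T (((k + 1 : Nat) : Int) - 1)).getD [] = dpA r0 rest k := by
      rw [hPidx, PySem.List.pyGet?_natCast, ihget k (by omega), if_pos le_rfl]
      rfl
    have hL : (PySem.List.pyGet? (r0 :: rest) ((k + 1 : Nat) : Int)).getD [] = rest.getD k [] := by
      rw [PySem.List.pyGet?_natCast]
      have hk2 : k < rest.length := by omega
      rw [List.getElem?_eq_getElem (by simp; omega)]
      simp [List.getD_eq_getElem?_getD, List.getElem?_eq_getElem hk2]
    rw [hP, hL]
    refine ⟨by simpa using ihlen, ?_⟩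
    intro m hm
    by_cases hmk : m = k + 1
    · subst hmk
      rw [List.getElem?_set_self (by omega), if_pos le_rfl]
      rfl
    · rw [List.getElem?_set_ne (by omega), ihget m hm]
      by_cases hle : m ≤ k
      · rw [if_pos hle, if_pos (by omega)]
      · rw [if_neg hle, if_neg (by omega)]

theorem dp_eq_B (r0 : List Int) (rest : List (List Int)) (hr : rest ≠ [] → 2 ≤ r0.length)
    (m : Nat) (hm : m ≤ rest.length) :
    dpA r0 rest m = (rest.take m).foldl stepRowB r0 := by
  induction m with
  | zero => rfl
  | succ m ih =>
    have hm' : m ≤ rest.length := by omega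
    have hmlt : m < rest.length := by omega
    have hlen2 : 2 ≤ (dpA r0 rest m).length := by
      cases m with
      | zero =>
        refine hr ?_
        intro h
        subst h
        simp at hmlt
      | succ m' =>
        rw [show dpA r0 rest (m' + 1) = aRow (dpA r0 rest m') (rest.getD m' []) from rfl,
          length_aRow]
        omega
    rw [show dpA r0 rest (m + 1) = aRow (dpA r0 rest m) (rest.getD m []) from rfl,
      stepEq _ _ hlen2, ih hm',
      List.take_succ_eq_append_getElem hmlt, List.foldl_append, List.foldl_cons, List.foldl_nil]
    congr 1
    simp [List.getD_eq_getElem?_getD, List.getElem?_eq_getElem hmlt]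

-- ===== VERDICT (by name: the statement is the Claim_ definition above) =====
theorem solution_spec : Claim_equal_solution := by
  intro land hdom hpre
  unfold Spec_solution
  obtain ⟨hne, hh, hh2, htail⟩ := hpre
  obtain ⟨r0, rest, rfl⟩ : ∃ r0 rest, land = r0 :: rest := by
    cases land with
    | nil => exact absurd rfl hne
    | cons a l => exact ⟨a, l, rfl⟩
  have hr : rest ≠ [] → 2 ≤ r0.length := by
    intro hrest
    have : 1 < (r0 :: rest).length := by
      cases rest with
      | nil => exact absurd rfl hrest
      | cons b t => simp
    simpa using hh2 this
  obtain ⟨Tlen, Tget⟩ := outer_inv r0 rest rest.length le_rfl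
  have hg0 : PySem.List.pyGet? (r0 :: rest) (0 : Int) = some r0 := by
    rw [show (0 : Int) = ((0 : Nat) : Int) from rfl, PySem.List.pyGet?_natCast]
    rfl
  have hln : (((r0 :: rest).length : Nat) : Int) = 1 + ((rest.length : Nat) : Int) := by
    push_cast [List.length_cons]
    ring
  simp only [solution, solution_alt, hln]
  rw [hln] at Tget
  have hidx2 : (1 + ((rest.length : Nat) : Int) - 1) = ((rest.length : Nat) : Int) := by ring
  rw [hidx2, PySem.List.pyGet?_natCast, Tget rest.length (by omega), if_pos le_rfl,
    PySem.List.slice_from_one]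
  simp only [hg0, Option.getD_some, List.tail_cons]
  rw [dp_eq_B r0 rest hr rest.length le_rfl, List.take_length]
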